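-- pv_equiv track=rewrite | github.com/kei-gnu/A-star_algolithm | a_star.py | create_maze_info
-- ===== SOURCE A (Python) =====
-- def create_maze_info(maze_string):
--     maze_row = []
--     maze_info = []
--     # char : 一文字の文字列を表す
--     for maze_char in maze_string:
--         if maze_char == '\n':
--             # 一つの行を変更が完了。保存してから次の行の整数変更
--             maze_info.append(maze_row)
--             maze_row = []
--         elif maze_char == 'W':
--             # 文字列Wを1に変更する
--             maze_row.append(1)
--         elif maze_char == '0':
--             maze_row.append(0)
--     return maze_info
-- ===== SOURCE B (Python) =====
-- def create_maze_info(maze_string):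
--     lines = maze_string.split('\n')
--     return [[1 if c == 'W' else 0 for c in line if c in 'W0'] for line in lines[:-1]]
-- ===== Notes on version B (the rewrite author's own statement) =====
-- stated objective: simpler
-- what changed: Replaces A's single flat character loop with mutable row/result accumulators by splitting the string on the newline separator, dropping the last segment, and converting each line with a comprehension mapping W/0 to 1/0.
import Mathlib
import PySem

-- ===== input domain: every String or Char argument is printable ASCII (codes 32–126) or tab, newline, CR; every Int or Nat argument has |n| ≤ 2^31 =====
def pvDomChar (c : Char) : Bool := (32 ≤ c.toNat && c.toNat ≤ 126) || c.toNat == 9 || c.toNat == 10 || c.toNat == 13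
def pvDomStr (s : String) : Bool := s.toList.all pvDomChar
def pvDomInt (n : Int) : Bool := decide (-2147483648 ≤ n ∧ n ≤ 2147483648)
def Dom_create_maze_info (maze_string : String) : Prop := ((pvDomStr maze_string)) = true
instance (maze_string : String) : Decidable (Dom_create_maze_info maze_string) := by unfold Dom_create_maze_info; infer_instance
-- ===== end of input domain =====

-- B replaces A's flat character loop with split('\n') / drop-last-segment / per-line comprehension (objective: simpler).

-- ===== PORT A =====
-- literal port of A: one pass over the characters with a current-row and a result accumulator
def create_maze_info (maze_string : String) : List (List Int) :=
  (maze_string.toList.foldl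
    (fun (st : List Int × List (List Int)) c =>
      if c = '\n' then ([], st.2 ++ [st.1])
      else if c = 'W' then (st.1 ++ [(1 : Int)], st.2)
      else if c = '0' then (st.1 ++ [(0 : Int)], st.2)
      else st)
    ([], [])).2

-- ===== PORT B =====
-- port of Source B: lines = maze_string.split('\n'); rows from lines[:-1] by a comprehension
def create_maze_info_alt (maze_string : String) : List (List Int) :=
  let lines := PySem.Chars.splitOn maze_string.toList ['\n']
  (PySem.List.slice lines none (some (-1))).map
    (fun line =>
      (line.filter (fun c => c = 'W' || c = '0')).map
        (fun c => if c = 'W' then (1 : Int) else 0))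

-- ===== PRECONDITION & SPEC =====
def Spec_create_maze_info (maze_string : String) (out : List (List Int)) : Prop := out = create_maze_info_alt maze_string
instance (maze_string : String) (out : List (List Int)) : Decidable (Spec_create_maze_info maze_string out) := by unfold Spec_create_maze_info; infer_instance

-- ===== CLAIM (what is proved, stated in full; the proofs are below) =====
def Claim_equal_create_maze_info : Prop := ∀ (maze_string : String), Dom_create_maze_info maze_string → Spec_create_maze_info maze_string (create_maze_info maze_string)

-- ===== LEMMAS AND PROOFS =====

-- contribution of one character to a row, as A adds it
def pvOptC (c : Char) : List Int :=
  if c = '\n' then [] else if c = 'W' then [1] else if c = '0' then [0] else []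

-- A's loop, written as the list of completed rows it appends
def pvParts (row : List Int) : List Char → List (List Int)
  | [] => []
  | c :: cs => if c = '\n' then row :: pvParts [] cs else pvParts (row ++ pvOptC c) cs

-- pure one-character split: (first segment, remaining segments)
def pvSplitNl : List Char → List Char × List (List Char)
  | [] => ([], [])
  | c :: cs =>
    if c = '\n' then ([], (pvSplitNl cs).1 :: (pvSplitNl cs).2)
    else (c :: (pvSplitNl cs).1, (pvSplitNl cs).2)

-- B's per-line conversion
def pvConv (l : List Char) : List Int :=
  (l.filter (fun c => c = 'W' || c = '0')).map (fun c => if c = 'W' then (1 : Int) else 0)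

theorem pvFoldA (cs : List Char) : ∀ (row : List Int) (info : List (List Int)),
    (cs.foldl
      (fun (st : List Int × List (List Int)) c =>
        if c = '\n' then ([], st.2 ++ [st.1])
        else if c = 'W' then (st.1 ++ [(1 : Int)], st.2)
        else if c = '0' then (st.1 ++ [(0 : Int)], st.2)
        else st)
      (row, info)).2 = info ++ pvParts row cs := by
  induction cs with
  | nil => intro row info; simp [pvParts]
  | cons c cs ih =>
    intro row info
    by_cases h : c = '\n'
    · simp [h, pvParts, ih]
    · by_cases hw : c = 'W'
      · simp [hw, pvParts, pvOptC, List.foldl_cons, ih]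
      · by_cases h0 : c = '0'
        · simp [h0, pvParts, pvOptC, List.foldl_cons, ih]
        · simp [h, hw, h0, pvParts, pvOptC, List.foldl_cons, ih]

theorem pvGoEq (fuel : Nat) : ∀ (l cur : List Char) (acc : List (List Char)),
    l.length < fuel →
    PySem.Chars.splitOn.go ['\n'] fuel l cur acc =
      acc.reverse ++ (cur.reverse ++ (pvSplitNl l).1) :: (pvSplitNl l).2 := by
  induction fuel with
  | zero => intro l cur acc h; omega
  | succ fuel ih =>
    intro l cur acc h
    cases l with
    | nil => simp [PySem.Chars.splitOn.go, pvSplitNl]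
    | cons c cs =>
      by_cases hc : c = '\n'
      · have hpre : List.isPrefixOf ['\n'] (c :: cs) = true := by simp [hc, List.isPrefixOf]
        rw [PySem.Chars.splitOn.go]
        simp only [hpre, if_true]
        have hdrop : List.drop (['\n'] : List Char).length (c :: cs) = cs := rfl
        rw [hdrop, ih cs [] (cur.reverse :: acc) (by simpa using Nat.lt_of_succ_lt_succ h)]
        subst hc
        have hsp : pvSplitNl ('\n' :: cs) = ([], (pvSplitNl cs).1 :: (pvSplitNl cs).2) := by
          rw [pvSplitNl]; simp
        rw [hsp]
        simp
      · have hpre : List.isPrefixOf ['\n'] (c :: cs) = false := by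
          simp [List.isPrefixOf]
          exact fun hh => hc hh.symm
        rw [PySem.Chars.splitOn.go]
        simp only [hpre]
        rw [ih cs (c :: cur) acc (by simpa using Nat.lt_of_succ_lt_succ h)]
        simp [pvSplitNl, hc]

theorem pvSplitOnEq (s : List Char) :
    PySem.Chars.splitOn s ['\n'] = (pvSplitNl s).1 :: (pvSplitNl s).2 := by
  unfold PySem.Chars.splitOn
  rw [pvGoEq (s.length + 1) s [] [] (by omega)]
  simp

theorem pvConvCons (c : Char) (l : List Char) : pvConv (c :: l) = pvOptC c ++ pvConv l := by
  by_cases hw : c = 'W'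
  · simp [pvConv, pvOptC, hw]
  · by_cases h0 : c = '0'
    · simp [pvConv, pvOptC, h0]
    · by_cases hn : c = '\n'
      · simp [pvConv, pvOptC, hn]
      · simp [pvConv, pvOptC, hw, h0]

theorem pvPartsEq (cs : List Char) : ∀ (row : List Int),
    pvParts row cs =
      ((row ++ pvConv (pvSplitNl cs).1) :: ((pvSplitNl cs).2).map pvConv).dropLast := by
  induction cs with
  | nil => intro row; simp [pvParts, pvSplitNl, pvConv]
  | cons c cs ih =>
    intro row
    by_cases hc : c = '\n'
    · simp only [pvParts, pvSplitNl, hc, if_true]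
      rw [ih []]
      cases h : pvSplitNl cs with
      | mk p ps => simp [pvConv]
    · simp only [pvParts, pvSplitNl, hc, if_false]
      rw [ih (row ++ pvOptC c)]
      simp [pvConvCons]

theorem pvSliceDropLast (l : List (List Char)) :
    PySem.List.slice l none (some (-1)) = l.dropLast := by
  simp [PySem.List.slice]
  rw [List.dropLast_eq_take]

-- ===== VERDICT (by name: the statement is the Claim_ definition above) =====
theorem create_maze_info_spec : Claim_equal_create_maze_info := by
  intro s _
  show create_maze_info s = create_maze_info_alt s
  have hA : create_maze_info s = [] ++ pvParts [] s.toList := pvFoldA s.toList [] []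
  have hB : create_maze_info_alt s =
      (PySem.List.slice (PySem.Chars.splitOn s.toList ['\n']) none (some (-1))).map pvConv := rfl
  rw [hA, hB, pvSplitOnEq, pvSliceDropLast, pvPartsEq, List.map_dropLast]
  simp
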